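-- pv_equiv track=rewrite | github.com/LuisEd2094/PushSwapApp | PushSwap/main.py | get_indexed_a
-- ===== SOURCE A (Python) =====
-- def get_indexed_a(stack_a):
--
--     index_a = list(range(1, len(stack_a) + 1))
--     stack_len= len(stack_a)
--
--     for index, value in enumerate(stack_a):
--         pos = 0
--         for v in stack_a:
--             if v > value:
--                 pos += 1
--         final_pos = stack_len - pos
--         index_a[index] = final_pos
--     return (index_a)
-- ===== SOURCE B (Python) =====
-- def get_indexed_a(stack_a):
--     # Sort once; the last write for each value v stores (last index of v in
--     # the sorted list) + 1 = number of elements <= v.  O(n log n) vs A's O(n^2).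
--     rank = {}
--     for i, v in enumerate(sorted(stack_a)):
--         rank[v] = i + 1
--     return [rank[x] for x in stack_a]
-- ===== Notes on version B (the rewrite author's own statement) =====
-- stated objective: faster
-- what changed: Replaces the nested counting scan (for each element, scan the whole list counting larger elements) with one sort plus a rank dictionary built in a single pass over the sorted list, then a single lookup pass.
import Mathlib
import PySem

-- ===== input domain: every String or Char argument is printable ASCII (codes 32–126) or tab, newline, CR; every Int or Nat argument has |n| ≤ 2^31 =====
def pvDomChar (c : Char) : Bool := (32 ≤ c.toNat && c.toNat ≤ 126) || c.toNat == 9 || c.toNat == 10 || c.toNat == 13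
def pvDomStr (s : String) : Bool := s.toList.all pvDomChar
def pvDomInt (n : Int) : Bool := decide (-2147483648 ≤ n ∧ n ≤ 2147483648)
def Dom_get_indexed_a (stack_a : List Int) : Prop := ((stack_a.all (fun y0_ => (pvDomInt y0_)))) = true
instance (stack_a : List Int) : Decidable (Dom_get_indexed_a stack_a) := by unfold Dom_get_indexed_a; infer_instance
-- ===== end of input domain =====

-- B replaces A's quadratic nested counting scan by one sort plus a rank dictionary
-- built in a single pass over the sorted list (objective: faster, O(n log n) vs O(n^2)).

-- ===== PORT A =====
def get_indexed_a (stack_a : List Int) : List Int :=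
  let index_a := PySem.List.pyRange 1 ((stack_a.length : Int) + 1) 1
  let stack_len : Int := stack_a.length
  (PySem.List.enumerate stack_a 0).foldl
    (fun index_a p =>
      let pos : Int := stack_a.foldl (fun pos v => if v > p.2 then pos + 1 else pos) 0
      let final_pos := stack_len - pos
      PySem.List.pySetD index_a p.1 final_pos)
    index_a

-- ===== PORT B =====
def get_indexed_a_alt (stack_a : List Int) : List Int :=
  let rank := (PySem.List.enumerate (PySem.List.sorted stack_a (fun x => x) false) 0).foldl
      (fun d p => d.insert p.2 (p.1 + 1)) (PySem.Dict.empty : PySem.Dict Int Int)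
  -- rank[x] (KeyError none: x ∈ stack_a ⊆ keys, so getD's default is never returned)
  stack_a.map (fun x => rank.getD x 0)

-- ===== PRECONDITION & SPEC =====
def Spec_get_indexed_a (stack_a : List Int) (out : List Int) : Prop := out = get_indexed_a_alt stack_a
instance (stack_a : List Int) (out : List Int) : Decidable (Spec_get_indexed_a stack_a out) := by unfold Spec_get_indexed_a; infer_instance

-- ===== CLAIM (what is proved, stated in full; the proofs are below) =====
def Claim_equal_get_indexed_a : Prop := ∀ (stack_a : List Int), Dom_get_indexed_a stack_a → Spec_get_indexed_a stack_a (get_indexed_a stack_a)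

-- ===== LEMMAS AND PROOFS =====

-- A's outer loop: writing g(value) at index i, over an init of the right length, is a map.
theorem foldl_setD_enumerate (g : Int → Int) (l : List Int) :
    ∀ (k : Nat) (init : List Int), init.length = k + l.length →
      (PySem.List.enumerate l (k : Int)).foldl
        (fun a p => PySem.List.pySetD a p.1 (g p.2)) init
      = init.take k ++ l.map g := by
  induction l with
  | nil =>
    intro k init h
    simp only [List.length_nil, Nat.add_zero] at h
    simp [PySem.List.enumerate_nil, List.take_of_length_le (le_of_eq h)]
  | cons x xs ih =>
    intro k init h
    rw [PySem.List.enumerate_cons]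
    simp only [List.foldl_cons]
    have hk : k < init.length := by rw [h]; simp
    have hset : PySem.List.pySetD init (k : Int) (g x) = init.set k (g x) := by
      simp [PySem.List.pySetD_natCast]
    rw [hset]
    have hcast : ((k : Int) + 1) = ((k + 1 : Nat) : Int) := by push_cast; ring
    rw [hcast, ih (k + 1) (init.set k (g x)) (by simp [h]; omega)]
    have hsetform : init.set k (g x) = init.take k ++ g x :: init.drop (k + 1) := by
      rw [List.set_eq_take_append_cons_drop]; simp [hk]
    rw [hsetform, List.take_append]
    have hlt : (init.take k).length = k := by simp [List.length_take]; omega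
    rw [hlt, List.take_of_length_le (by simp [hlt])]
    simp

-- A's inner loop counts the elements strictly greater than p.2.
theorem inner_count (l : List Int) (x : Int) :
    l.foldl (fun pos v => if v > x then pos + 1 else pos) (0 : Int)
      = (l.countP (fun v => decide (x < v)) : Int) := by
  have := PySem.List.foldl_count_if (fun v => decide (x < v)) l 0
  simpa [gt_iff_lt] using this

-- B's rank dictionary: on a ≤-sorted list, looking up a member x returns
-- the number of elements ≤ x (the last write wins).
theorem rank_lookup (s : List Int) (hs : s.Pairwise (· ≤ ·)) (x : Int) (hx : x ∈ s) :
    ((PySem.List.enumerate s 0).foldl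
        (fun d p => d.insert p.2 (p.1 + 1)) (PySem.Dict.empty : PySem.Dict Int Int)).getD x 0
      = (s.countP (fun v => decide (v ≤ x)) : Int) := by
  induction s using List.reverseRecOn with
  | nil => simp at hx
  | append_singleton t y ih =>
    rw [PySem.List.enumerate_append, List.foldl_append]
    simp only [PySem.List.enumerate_cons, PySem.List.enumerate_nil, List.foldl_cons,
      List.foldl_nil, Int.zero_add]
    rw [PySem.Dict.getD_insert]
    have hpair := (List.pairwise_append.mp hs)
    have hty : ∀ z ∈ t, z ≤ y := fun z hz => hpair.2.2 z hz y (by simp)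
    by_cases hxy : x = y
    · subst hxy
      have hcnt : t.countP (fun v => decide (v ≤ x)) = t.length :=
        List.countP_eq_length.mpr (fun z hz => by simpa using hty z hz)
      simp [List.countP_append, hcnt]
    · have hxt : x ∈ t := by
        rcases List.mem_append.mp hx with h | h
        · exact h
        · exact absurd (by simpa using h) hxy
      have hxlty : x < y := lt_of_le_of_ne (hty x hxt) hxy
      rw [if_neg hxy, ih hpair.1 hxt]
      have : (t ++ [y]).countP (fun v => decide (v ≤ x)) = t.countP (fun v => decide (v ≤ x)) := by
        simp [List.countP_append, not_le.mpr hxlty]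
      rw [this]

-- The two per-element values agree for every member of the list.
theorem pointwise (l : List Int) (x : Int) :
    (l.length : Int) - (l.countP (fun v => decide (x < v)) : Int)
      = ((PySem.List.sorted l (fun x => x) false).countP (fun v => decide (v ≤ x)) : Int) := by
  have hperm : (PySem.List.sorted l (fun x => x) false).Perm l := PySem.List.sorted_perm l _ _
  rw [hperm.countP_eq]
  have hsplit := List.length_eq_countP_add_countP (l := l) (fun v => decide (v ≤ x))
  have hcongr : l.countP (fun v => decide ¬(decide (v ≤ x)) = true)
      = l.countP (fun v => decide (x < v)) := by
    apply List.countP_congr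
    intro v _
    simp [not_le]
  rw [hcongr] at hsplit
  omega

-- ===== VERDICT (by name: the statement is the Claim_ definition above) =====
theorem get_indexed_a_spec : Claim_equal_get_indexed_a := by
  intro stack_a _
  unfold Spec_get_indexed_a get_indexed_a get_indexed_a_alt
  have hlen : (PySem.List.pyRange 1 ((stack_a.length : Int) + 1) 1).length
      = 0 + stack_a.length := by
    rw [PySem.List.length_pyRange_one]; simp
  have hA := foldl_setD_enumerate
    (fun x => (stack_a.length : Int) - (stack_a.countP (fun v => decide (x < v)) : Int))
    stack_a 0 (PySem.List.pyRange 1 ((stack_a.length : Int) + 1) 1) hlen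
  simp only [Nat.cast_zero, List.take_zero, List.nil_append] at hA
  simp only [inner_count]
  rw [hA]
  apply List.map_congr_left
  intro x hx
  rw [rank_lookup _ (by simpa using PySem.List.sorted_pairwise stack_a (fun x => x)) x
    (by simpa [PySem.List.mem_sorted] using hx)]
  exact pointwise stack_a x
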